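-- pv_equiv track=rewrite | github.com/Marzan1/Biology-Meets-Programming | randomized_motifs_search.py | pseudocounts
-- ===== SOURCE A (Python) =====
-- k = 8
--
-- t = 5
--
-- dna = ["CGCCCCTCTCGGGGGTGTTCAGTAAACGGCCA", "GGGCGAGGTATGTGTAAGTGCCAAGGTGCCAG", "TAGTACCGAGACCGAAAGAAGTATACAGGCGT", "TAGATCAAGTTTCAGGTGCACGTCGGTGAACC", "AATCCACCAGCTCCACGTGCAATGTTGGCCTA"]
--
-- def profile_most_probable_kmer(text, k, profile):
--     loop = len(text) - k + 1
--     most = []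
--     for i in range(loop):
--         pattern = text[i:i+k]
--         most.append(pr(pattern, profile))
--     maximum = max(most)
--     for i in range(loop):
--         pattern = text[i:i+k]
--         if pr(pattern, profile) == maximum:
--             return pattern
--
-- def pr(text, profile):
--     k = len(text)
--     pro = []
--     p = 1.0
--     for i in range(k):
--         pro.append(profile[text[i]][i])
--     for i in pro:
--         p *= i
--     return p
--
-- def motifs(profile, dna, k):
--     loop = len(dna)
--     motifs = []
--     for i in range(loop):
--         motifs.append(profile_most_probable_kmer(dna[i], k, profile))
--     return motifs
--
-- def pseudocounts(motifs):
--     t = len(motifs)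
--     k = len(motifs[0])
--     count = {}
--     for symbol in "ACGT":
--         count[symbol] = []
--         for j in range(k):
--              count[symbol].append(1)
--     for i in range(t):
--         for j in range(k):
--             symbol = motifs[i][j]
--             count[symbol][j] += 1
--     return count
-- ===== SOURCE B (Python) =====
-- def pseudocounts(motifs):
--     k = len(motifs[0])
--     return {s: [1 + sum(1 for m in motifs if m[j] == s) for j in range(k)]
--             for s in "ACGT"}
-- ===== Notes on version B (the rewrite author's own statement) =====
-- stated objective: simpler
-- what changed: Replaces A's mutable count matrix updated cell-by-cell over a row-major double loop with a single dict comprehension that computes each symbol/column pseudocount in closed form by tallying that column directly.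
import Mathlib
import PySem

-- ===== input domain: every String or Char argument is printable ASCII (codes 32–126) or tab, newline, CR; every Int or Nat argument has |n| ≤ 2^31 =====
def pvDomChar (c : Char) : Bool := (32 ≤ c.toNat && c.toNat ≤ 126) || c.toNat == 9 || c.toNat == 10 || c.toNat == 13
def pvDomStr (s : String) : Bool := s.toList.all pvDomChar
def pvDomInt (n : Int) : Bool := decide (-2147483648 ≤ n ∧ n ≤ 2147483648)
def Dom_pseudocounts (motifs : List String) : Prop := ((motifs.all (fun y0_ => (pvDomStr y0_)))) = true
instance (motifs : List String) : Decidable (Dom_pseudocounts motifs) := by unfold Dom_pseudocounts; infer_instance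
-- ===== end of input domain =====

-- B replaces A's mutable count matrix updated cell-by-cell with a per-symbol/per-column
-- closed-form tally built by a dict comprehension (objective: simpler; same asymptotic cost).


-- ===== PORT A =====
def pseudocounts (motifs : List String) : List (String × List Int) :=
  let t : Int := motifs.length
  let k : Int := (PySem.List.pyGetD motifs 0 "").toList.length
  let count : PySem.Dict String (List Int) :=
    "ACGT".toList.foldl (fun d symbol =>
      (PySem.List.pyRange 0 k 1).foldl
        (fun d _ => d.modify (String.singleton symbol) [] (fun l => l ++ [(1 : Int)]))
        (d.insert (String.singleton symbol) []))
      PySem.Dict.empty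
  let count :=
    (PySem.List.pyRange 0 t 1).foldl (fun d i =>
      (PySem.List.pyRange 0 k 1).foldl (fun d j =>
        d.modify (String.singleton (PySem.List.pyGetD (PySem.List.pyGetD motifs i "").toList j ' ')) []
          (fun l => PySem.List.pySetD l j (PySem.List.pyGetD l j 0 + 1))) d)
      count
  count.items

-- ===== PORT B =====
def pseudocounts_alt (motifs : List String) : List (String × List Int) :=
  let k : Int := (PySem.List.pyGetD motifs 0 "").toList.length
  "ACGT".toList.map (fun s =>
    (String.singleton s,
      (PySem.List.pyRange 0 k 1).map (fun j =>
        1 + motifs.foldl (fun acc m => if PySem.List.pyGetD m.toList j ' ' == s then acc + 1 else acc) (0 : Int))))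

-- ===== PRECONDITION & SPEC =====
-- Pre_ excludes exactly the inputs on which the Python A raises: the empty list (IndexError on
-- motifs[0]), a motif shorter than len(motifs[0]) (IndexError), or a symbol outside "ACGT" in the
-- first len(motifs[0]) columns (KeyError).
def Pre_pseudocounts (motifs : List String) : Prop :=
  motifs ≠ [] ∧ ∀ m ∈ motifs,
    (motifs.headD "").toList.length ≤ m.toList.length ∧
    ∀ j < (motifs.headD "").toList.length, m.toList.getD j ' ' ∈ (['A', 'C', 'G', 'T'] : List Char)
instance (motifs : List String) : Decidable (Pre_pseudocounts motifs) := by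
  unfold Pre_pseudocounts; infer_instance
def pvWitness_pseudocounts : List String := ["AC", "GT"]

def Spec_pseudocounts (motifs : List String) (out : List (String × List Int)) : Prop :=
  out = pseudocounts_alt motifs
instance (motifs : List String) (out : List (String × List Int)) : Decidable (Spec_pseudocounts motifs out) := by
  unfold Spec_pseudocounts; infer_instance

-- ===== CLAIM (what is proved, stated in full; the proofs are below) =====
def Claim_equal_pseudocounts : Prop := ∀ (motifs : List String), Dom_pseudocounts motifs →
  Pre_pseudocounts motifs → Spec_pseudocounts motifs (pseudocounts motifs)
-- ===== LEMMAS AND PROOFS =====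

def pvChars : List Char := ['A', 'C', 'G', 'T']
def pvKeys : List String := ["A", "C", "G", "T"]

lemma pv_singleton_eq_iff (a b : Char) : String.singleton a = String.singleton b ↔ a = b := by
  constructor
  · intro h
    have := congrArg String.toList h
    simpa [String.toList_singleton] using this
  · rintro rfl; rfl

lemma pv_mem_pvKeys_of_mem_pvChars {c : Char} (h : c ∈ pvChars) :
    String.singleton c ∈ pvKeys := by
  simp [pvChars] at h
  rcases h with rfl | rfl | rfl | rfl <;> decide

-- the init inner loop: repeated append of 1 to count[s]
lemma pv_appfold_getD (L : List Int) (d : PySem.Dict String (List Int)) (s x : String) :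
    ((L.foldl (fun d _ => d.modify s [] (fun v => v ++ [(1 : Int)])) d).getD x []) =
      d.getD x [] ++ (if x = s then List.replicate L.length (1 : Int) else []) := by
  induction L generalizing d with
  | nil => simp
  | cons a L ih =>
    rw [List.foldl_cons, ih, PySem.Dict.getD_modify]
    by_cases hx : x = s <;> simp [hx, List.replicate_succ]

lemma pv_appfold_keys (L : List Int) (d : PySem.Dict String (List Int)) (s : String)
    (h : s ∈ d.keys) :
    ((L.foldl (fun d _ => d.modify s [] (fun v => v ++ [(1 : Int)])) d).keys) = d.keys := by
  induction L generalizing d with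
  | nil => rfl
  | cons a L ih =>
    rw [List.foldl_cons, ih]
    · rw [PySem.Dict.keys_modify, PySem.Dict.keys_insert_of_contains]
      exact (PySem.Dict.contains_iff_mem_keys _ _).2 h
    · rw [PySem.Dict.keys_modify, PySem.Dict.keys_insert_of_contains]
      · exact h
      · exact (PySem.Dict.contains_iff_mem_keys _ _).2 h

def pvBlk (k : Int) (d : PySem.Dict String (List Int)) (c : Char) : PySem.Dict String (List Int) :=
  (PySem.List.pyRange 0 k 1).foldl
    (fun d _ => d.modify (String.singleton c) [] (fun l => l ++ [(1 : Int)]))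
    (d.insert (String.singleton c) [])

lemma pv_blk_getD (k : Int) (hk : 0 ≤ k) (d : PySem.Dict String (List Int)) (c : Char) (x : String) :
    (pvBlk k d c).getD x [] =
      if x = String.singleton c then List.replicate k.toNat 1 else d.getD x [] := by
  unfold pvBlk
  rw [pv_appfold_getD, PySem.Dict.getD_insert]
  have hlen : (PySem.List.pyRange 0 k 1).length = k.toNat := by
    rw [PySem.List.length_pyRange_one]; omega
  by_cases hx : x = String.singleton c <;> simp [hx, hlen]

lemma pv_blk_keys (k : Int) (d : PySem.Dict String (List Int)) (c : Char) :
    (pvBlk k d c).keys =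
      if String.singleton c ∈ d.keys then d.keys else d.keys ++ [String.singleton c] := by
  unfold pvBlk
  rw [pv_appfold_keys]
  · by_cases h : String.singleton c ∈ d.keys
    · rw [PySem.Dict.keys_insert_of_contains _ _ ((PySem.Dict.contains_iff_mem_keys _ _).2 h)]
      simp [h]
    · rw [PySem.Dict.keys_insert_of_not_contains]
      · simp [h]
      · by_contra hc
        exact h ((PySem.Dict.contains_iff_mem_keys _ _).1 (by simpa using hc))
  · exact (PySem.Dict.mem_keys_insert _ _ _ _).2 (Or.inl rfl)

def pvInit (k : Int) : PySem.Dict String (List Int) :=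
  "ACGT".toList.foldl (fun d symbol =>
    (PySem.List.pyRange 0 k 1).foldl
      (fun d _ => d.modify (String.singleton symbol) [] (fun l => l ++ [(1 : Int)]))
      (d.insert (String.singleton symbol) []))
    PySem.Dict.empty

lemma pv_init_eq (k : Int) : pvInit k = pvBlk k (pvBlk k (pvBlk k (pvBlk k PySem.Dict.empty 'A') 'C') 'G') 'T' := rfl

lemma pv_init_keys (k : Int) : (pvInit k).keys = pvKeys := by
  rw [pv_init_eq]
  rw [pv_blk_keys, pv_blk_keys, pv_blk_keys, pv_blk_keys]
  simp [PySem.Dict.keys_empty]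
  decide

lemma pv_init_getD (k : Int) (hk : 0 ≤ k) (x : String) (hx : x ∈ pvKeys) :
    (pvInit k).getD x [] = List.replicate k.toNat 1 := by
  rw [pv_init_eq]
  rw [pv_blk_getD _ hk, pv_blk_getD _ hk, pv_blk_getD _ hk, pv_blk_getD _ hk]
  simp [pvKeys] at hx
  rcases hx with rfl | rfl | rfl | rfl
  · rw [if_neg (by decide), if_neg (by decide), if_neg (by decide), if_pos (by decide)]
  · rw [if_neg (by decide), if_neg (by decide), if_pos (by decide)]
  · rw [if_neg (by decide), if_pos (by decide)]
  · rw [if_pos (by decide)]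

def pvRow (k : Int) (m : String) (d : PySem.Dict String (List Int)) : PySem.Dict String (List Int) :=
  (PySem.List.pyRange 0 k 1).foldl (fun d j =>
    d.modify (String.singleton (PySem.List.pyGetD m.toList j ' ')) []
      (fun l => PySem.List.pySetD l j (PySem.List.pyGetD l j 0 + 1))) d

-- one row of A's main double loop, characterised pointwise
lemma pv_row_aux (m : String) (n : Nat) (d : PySem.Dict String (List Int))
    (hd : ∀ j < n, String.singleton (m.toList.getD j ' ') ∈ d.keys)
    (hlen : ∀ x ∈ d.keys, n ≤ (d.getD x []).length) :
    (pvRow (n : Int) m d).keys = d.keys ∧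
    (∀ x, ((pvRow (n : Int) m d).getD x []).length = (d.getD x []).length) ∧
    (∀ x ∈ d.keys, ∀ j0 : Nat, ((pvRow (n : Int) m d).getD x []).getD j0 0 =
      (d.getD x []).getD j0 0 +
        (if j0 < n ∧ String.singleton (m.toList.getD j0 ' ') = x then 1 else 0)) := by
  induction n with
  | zero =>
    refine ⟨?_, ?_, ?_⟩ <;>
      simp [pvRow, PySem.List.pyRange_one_eq_nil (le_refl (0 : Int))]
  | succ n ih =>
    have hd' : ∀ j < n, String.singleton (m.toList.getD j ' ') ∈ d.keys :=
      fun j hj => hd j (by omega)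
    have hlen' : ∀ x ∈ d.keys, n ≤ (d.getD x []).length :=
      fun x hx => le_trans (by omega) (hlen x hx)
    obtain ⟨ihk, ihl, ihv⟩ := ih hd' hlen'
    have hstep : pvRow ((n + 1 : Nat) : Int) m d =
        (pvRow (n : Int) m d).modify (String.singleton (m.toList.getD n ' ')) []
          (fun l => PySem.List.pySetD l (n : Int) (PySem.List.pyGetD l (n : Int) 0 + 1)) := by
      unfold pvRow
      have hcast : ((n + 1 : Nat) : Int) = (n : Int) + 1 := by push_cast; ring
      rw [hcast, PySem.List.pyRange_one_succ_right (by positivity), List.foldl_append]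
      simp
    have hkmem : String.singleton (m.toList.getD n ' ') ∈ (pvRow (n : Int) m d).keys := by
      rw [ihk]; exact hd n (by omega)
    refine ⟨?_, ?_, ?_⟩
    · rw [hstep, PySem.Dict.keys_modify,
        PySem.Dict.keys_insert_of_contains _ _ ((PySem.Dict.contains_iff_mem_keys _ _).2 hkmem)]
      exact ihk
    · intro x
      rw [hstep, PySem.Dict.getD_modify]
      split_ifs with hx
      · subst hx; simp [ihl]
      · exact ihl x
    · intro x hx j0
      have hLlen : n < ((pvRow (n : Int) m d).getD (String.singleton (m.toList.getD n ' ')) []).length := by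
        rw [ihl]
        exact lt_of_lt_of_le (by omega) (hlen _ (hd n (by omega)))
      rw [hstep, PySem.Dict.getD_modify]
      by_cases hx' : x = String.singleton (m.toList.getD n ' ')
      · rw [if_pos hx']
        subst hx'
        simp only [PySem.List.pySetD_natCast, PySem.List.pyGetD_natCast]
        rw [List.getD_eq_getElem?_getD, List.getElem?_set]
        by_cases hj : j0 = n
        · subst hj
          rw [if_pos rfl, if_pos hLlen, Option.getD_some, ihv _ hx j0]
          rw [if_pos (show j0 < j0 + 1 ∧ String.singleton (m.toList.getD j0 ' ') =
                String.singleton (m.toList.getD j0 ' ') from ⟨by omega, rfl⟩)]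
          rw [if_neg (fun h => absurd h.1 (Nat.lt_irrefl j0))]
          omega
        · rw [if_neg (by omega), ← List.getD_eq_getElem?_getD, ihv _ hx j0]
          congr 1
          refine if_congr ?_ rfl rfl
          constructor <;> (rintro ⟨h1, h2⟩; exact ⟨by omega, h2⟩)
      · rw [if_neg hx', ihv _ hx j0]
        congr 1
        by_cases hj : j0 = n
        · subst hj
          rw [if_neg (by omega), if_neg (by rintro ⟨-, h2⟩; exact hx' h2.symm)]
        · refine if_congr ?_ rfl rfl
          constructor <;> (rintro ⟨h1, h2⟩; exact ⟨by omega, h2⟩)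

-- the outer loop over the motifs, characterised via countP
lemma pv_rows (K : Nat) (rows : List String) (d : PySem.Dict String (List Int))
    (hrows : ∀ m ∈ rows, K ≤ m.toList.length ∧ ∀ j < K, m.toList.getD j ' ' ∈ pvChars)
    (hkeys : d.keys = pvKeys)
    (hlen : ∀ x ∈ pvKeys, (d.getD x []).length = K) :
    (rows.foldl (fun d m => pvRow (K : Int) m d) d).keys = pvKeys ∧
    (∀ x ∈ pvKeys, ((rows.foldl (fun d m => pvRow (K : Int) m d) d).getD x []).length = K ∧
      ∀ j0 < K, ((rows.foldl (fun d m => pvRow (K : Int) m d) d).getD x []).getD j0 0 =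
        (d.getD x []).getD j0 0 +
          (rows.countP (fun m => String.singleton (m.toList.getD j0 ' ') == x) : Int)) := by
  revert hrows hkeys hlen
  induction rows generalizing d with
  | nil =>
    intro hrows hkeys hlen
    exact ⟨hkeys, fun x hx => ⟨hlen x hx, fun j0 _ => by simp⟩⟩
  | cons m rows ih =>
    intro hrows hkeys hlen
    have hm := hrows m (List.mem_cons_self)
    have hd0 : ∀ j < K, String.singleton (m.toList.getD j ' ') ∈ d.keys := by
      intro j hj; rw [hkeys]; exact pv_mem_pvKeys_of_mem_pvChars (hm.2 j hj)
    have hlen0 : ∀ x ∈ d.keys, K ≤ (d.getD x []).length := by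
      intro x hx; rw [hkeys] at hx; exact le_of_eq (hlen x hx).symm
    obtain ⟨hk1, hl1, hv1⟩ := pv_row_aux m K d hd0 hlen0
    have hkeys' : (pvRow (K : Int) m d).keys = pvKeys := by rw [hk1, hkeys]
    have hlen' : ∀ x ∈ pvKeys, ((pvRow (K : Int) m d).getD x []).length = K := by
      intro x hx; rw [hl1]; exact hlen x hx
    obtain ⟨hk2, hv2⟩ := ih (pvRow (K : Int) m d)
      (fun m' hm' => hrows m' (List.mem_cons_of_mem _ hm')) hkeys' hlen'
    rw [List.foldl_cons]
    refine ⟨hk2, ?_⟩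
    intro x hx
    obtain ⟨hlx, hvx⟩ := hv2 x hx
    refine ⟨hlx, ?_⟩
    intro j0 hj0
    rw [hvx j0 hj0, hv1 x (by rw [hkeys]; exact hx) j0, List.countP_cons]
    by_cases hp : String.singleton (m.toList.getD j0 ' ') = x
    · simp [← hp, hj0]; ring
    · simp [hj0]; ring

lemma pv_A_eq (motifs : List String) :
    pseudocounts motifs =
      (motifs.foldl (fun d m => pvRow ((PySem.List.pyGetD motifs 0 "").toList.length : Int) m d)
        (pvInit ((PySem.List.pyGetD motifs 0 "").toList.length : Int))).items := by
  simp only [pseudocounts, pvInit, pvRow]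
  exact congrArg PySem.Dict.items
    (PySem.List.foldl_pyRange_zero_pyGetD' motifs ""
      (fun d m => List.foldl (fun (d : PySem.Dict String (List Int)) j =>
        d.modify (String.singleton (PySem.List.pyGetD m.toList j ' ')) []
          (fun l => PySem.List.pySetD l j (PySem.List.pyGetD l j 0 + 1))) d
        (PySem.List.pyRange 0 ((PySem.List.pyGetD motifs 0 "").toList.length : Int) 1)) _)

-- ===== VERDICT (by name: the statement is the Claim_ definition above) =====
theorem pseudocounts_spec : Claim_equal_pseudocounts := by
  intro motifs _ hpre
  obtain ⟨hne, hall⟩ := hpre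
  obtain ⟨m0, rest, rfl⟩ := List.exists_cons_of_ne_nil hne
  unfold Spec_pseudocounts
  have hk : PySem.List.pyGetD (m0 :: rest) 0 "" = m0 := PySem.List.pyGetD_zero_cons m0 rest ""
  rw [pv_A_eq]
  simp only [pseudocounts_alt]
  rw [hk]
  simp only [List.headD_cons] at hall
  have hrows : ∀ m ∈ m0 :: rest, m0.toList.length ≤ m.toList.length ∧
      ∀ j < m0.toList.length, m.toList.getD j ' ' ∈ pvChars := by
    intro m hm
    exact ⟨(hall m hm).1, fun j hj => by simpa [pvChars] using (hall m hm).2 j hj⟩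
  have hlen0 : ∀ x ∈ pvKeys, ((pvInit (m0.toList.length : Int)).getD x []).length = m0.toList.length := by
    intro x hx
    rw [pv_init_getD _ (by positivity) x hx]
    simp
  obtain ⟨hK, hV⟩ := pv_rows m0.toList.length (m0 :: rest) (pvInit (m0.toList.length : Int))
    hrows (pv_init_keys _) hlen0
  have hnd : ((m0 :: rest).foldl (fun d m => pvRow (m0.toList.length : Int) m d)
      (pvInit (m0.toList.length : Int))).keys.Nodup := by
    rw [hK]; decide
  rw [PySem.Dict.items_eq_map_keys _ hnd [], hK]
  have hcol : ∀ c : Char, String.singleton c ∈ pvKeys →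
      ((m0 :: rest).foldl (fun d m => pvRow (m0.toList.length : Int) m d)
          (pvInit (m0.toList.length : Int))).getD (String.singleton c) [] =
        (PySem.List.pyRange 0 (m0.toList.length : Int) 1).map (fun j =>
          1 + (m0 :: rest).foldl
            (fun acc m => if PySem.List.pyGetD m.toList j ' ' == c then acc + 1 else acc)
            (0 : Int)) := by
    intro c hc
    obtain ⟨hLx, hVx⟩ := hV _ hc
    apply List.ext_getElem
    · rw [hLx]
      simp [PySem.List.length_pyRange_one]
    · intro j0 h1 h2
      have hj0 : j0 < m0.toList.length := by rw [hLx] at h1; exact h1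
      rw [← List.getD_eq_getElem _ 0 h1, hVx j0 hj0,
        pv_init_getD _ (by positivity) _ hc]
      rw [List.getElem_map, PySem.List.getElem_pyRange_one]
      have hr : (0 : Int) + (j0 : Int) = (j0 : Int) := zero_add _
      rw [hr]
      rw [show (m0 :: rest).foldl
            (fun acc m => if PySem.List.pyGetD m.toList (j0 : Int) ' ' == c then acc + 1 else acc)
            (0 : Int) =
          (0 : Int) + ((m0 :: rest).countP (fun m => PySem.List.pyGetD m.toList (j0 : Int) ' ' == c) : Int)
        from PySem.List.foldl_count_if _ _ _]
      have hcnt : (m0 :: rest).countP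
            (fun m => String.singleton (m.toList.getD j0 ' ') == String.singleton c) =
          (m0 :: rest).countP (fun m => PySem.List.pyGetD m.toList (j0 : Int) ' ' == c) := by
        apply List.countP_congr
        intro m _
        simp [pv_singleton_eq_iff]
      rw [hcnt]
      rw [List.getD_replicate _ (by simpa using hj0)]
      ring
  have hacgt : "ACGT".toList = ['A', 'C', 'G', 'T'] := rfl
  rw [hacgt]
  simp only [pvKeys, List.map_cons, List.map_nil]
  have eA : ("A" : String) = String.singleton 'A' := by decide
  have eC : ("C" : String) = String.singleton 'C' := by decide
  have eG : ("G" : String) = String.singleton 'G' := by decide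
  have eT : ("T" : String) = String.singleton 'T' := by decide
  rw [eA, eC, eG, eT, hcol 'A' (by decide), hcol 'C' (by decide), hcol 'G' (by decide),
    hcol 'T' (by decide)]
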